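-- pv_equiv track=rewrite | github.com/BJS-kr/Records | algorithm/recursive call/기본 문제 모음.py | combinate
-- ===== SOURCE A (Python) =====
-- def combinate(n):
--     combis = list()
--     a = n
--     b = n // 2
--     c = n // 3
--     for i in range(a+1):
--         for j in range(b+1):
--             for k in range(c+1):
--                 if i + j*2 + k*3 == n:
--                     combis.append([i,j,k])
--     return combis
-- ===== SOURCE B (Python) =====
-- def combinate(n):
--     combis = []
--     for i in range(n + 1):
--         for j in range(n // 2 + 1):
--             if n - i - 2 * j >= 0 and (n - i - 2 * j) % 3 == 0:
--                 combis.append([i, j, (n - i - 2 * j) // 3])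
--     return combis
-- ===== Notes on version B (the rewrite author's own statement) =====
-- stated objective: faster
-- what changed: B drops A's innermost loop over k: for each (i, j) it solves for k directly from the remaining sum, appending the triple only when that remainder is nonnegative and evenly divisible.
import Mathlib
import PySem

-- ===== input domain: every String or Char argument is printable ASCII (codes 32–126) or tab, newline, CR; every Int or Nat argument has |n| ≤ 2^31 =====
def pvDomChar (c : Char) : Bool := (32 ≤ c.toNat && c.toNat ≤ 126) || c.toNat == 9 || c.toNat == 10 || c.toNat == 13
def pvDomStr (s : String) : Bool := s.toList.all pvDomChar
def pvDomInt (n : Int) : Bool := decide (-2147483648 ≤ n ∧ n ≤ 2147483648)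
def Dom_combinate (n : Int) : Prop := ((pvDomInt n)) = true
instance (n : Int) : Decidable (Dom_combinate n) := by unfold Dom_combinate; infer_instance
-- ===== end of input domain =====

-- B replaces A's innermost loop by solving for k directly (divisibility check); proved equal for all n.

-- ===== PORT A =====
def combinate (n : Int) : List (List Int) :=
  let combis : List (List Int) := []
  let a := n
  let b := PySem.Int.floordiv n 2
  let c := PySem.Int.floordiv n 3
  (PySem.List.pyRange 0 (a + 1) 1).foldl (fun combis i =>
    (PySem.List.pyRange 0 (b + 1) 1).foldl (fun combis j =>
      (PySem.List.pyRange 0 (c + 1) 1).foldl (fun combis k =>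
        if i + j * 2 + k * 3 = n then combis ++ [[i, j, k]] else combis) combis) combis) combis

-- ===== PORT B =====
def combinate_alt (n : Int) : List (List Int) :=
  let combis : List (List Int) := []
  (PySem.List.pyRange 0 (n + 1) 1).foldl (fun combis i =>
    (PySem.List.pyRange 0 (PySem.Int.floordiv n 2 + 1) 1).foldl (fun combis j =>
      if 0 ≤ n - i - 2 * j ∧ PySem.Int.mod (n - i - 2 * j) 3 = 0
      then combis ++ [[i, j, PySem.Int.floordiv (n - i - 2 * j) 3]]
      else combis) combis) combis

-- ===== PRECONDITION & SPEC =====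
def Spec_combinate (n : Int) (out : List (List Int)) : Prop := out = combinate_alt n
instance (n : Int) (out : List (List Int)) : Decidable (Spec_combinate n out) := by unfold Spec_combinate; infer_instance

-- ===== CLAIM (what is proved, stated in full; the proofs are below) =====
def Claim_equal_combinate : Prop := ∀ (n : Int), Dom_combinate n → Spec_combinate n (combinate n)

-- ===== LEMMAS AND PROOFS =====

-- A's innermost k-loop collapses to B's single divisibility test.
theorem combinate_inner (n i j : Int) (hi : 0 ≤ i) (hj : 0 ≤ j) (acc : List (List Int)) :
    (PySem.List.pyRange 0 (PySem.Int.floordiv n 3 + 1) 1).foldl (fun combis k =>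
        if i + j * 2 + k * 3 = n then combis ++ [[i, j, k]] else combis) acc
      = if 0 ≤ n - i - 2 * j ∧ PySem.Int.mod (n - i - 2 * j) 3 = 0
        then acc ++ [[i, j, PySem.Int.floordiv (n - i - 2 * j) 3]]
        else acc := by
  rw [PySem.List.foldl_append_ite (p := fun k => i + j * 2 + k * 3 = n) (f := fun k => [i, j, k])]
  simp only [PySem.Int.mod_eq_emod_of_pos (by norm_num : (0:Int) < 3),
      PySem.Int.floordiv_eq_ediv_of_pos (by norm_num : (0:Int) < 3)]
  by_cases h : 0 ≤ n - i - 2 * j ∧ (n - i - 2 * j) % 3 = 0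
  · rw [if_pos h]
    have hfil : (PySem.List.pyRange 0 (n / 3 + 1) 1).filter
        (fun k => decide (i + j * 2 + k * 3 = n))
        = (PySem.List.pyRange 0 (n / 3 + 1) 1).filter
            (fun k => k == (n - i - 2 * j) / 3) := by
      refine List.filter_congr ?_
      intro k hk
      have hk' := (PySem.List.mem_pyRange_one).1 hk
      have hb : (k == (n - i - 2 * j) / 3) = decide (k = (n - i - 2 * j) / 3) := rfl
      rw [hb, decide_eq_decide]
      omega
    rw [hfil, List.filter_beq]
    have hmem : (n - i - 2 * j) / 3 ∈ PySem.List.pyRange 0 (n / 3 + 1) 1 := by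
      rw [PySem.List.mem_pyRange_one]
      omega
    rw [List.count_eq_one_of_mem (PySem.List.nodup_pyRange_one _ _) hmem]
    simp
  · rw [if_neg h]
    have hfil : (PySem.List.pyRange 0 (n / 3 + 1) 1).filter
        (fun k => decide (i + j * 2 + k * 3 = n)) = [] := by
      rw [List.filter_eq_nil_iff]
      intro k hk
      have hk' := (PySem.List.mem_pyRange_one).1 hk
      simp only [decide_eq_true_eq]
      omega
    rw [hfil]
    simp

-- ===== VERDICT (by name: the statement is the Claim_ definition above) =====
theorem combinate_spec : Claim_equal_combinate := by
  intro n _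
  unfold Spec_combinate combinate combinate_alt
  simp only []
  apply PySem.List.foldl_congr_mem
  intro acc i hi
  have hi0 : 0 ≤ i := ((PySem.List.mem_pyRange_one).1 hi).1
  apply PySem.List.foldl_congr_mem
  intro acc2 j hj
  have hj0 : 0 ≤ j := ((PySem.List.mem_pyRange_one).1 hj).1
  exact combinate_inner n i j hi0 hj0 acc2
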